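-- pv_equiv track=rewrite | github.com/Killer545537/Matrix | basicmatrices.py | upper_triangular
-- ===== SOURCE A (Python) =====
-- def null(rows: int, columns: int) -> list[list[int]]:
--     null_matrix = [
--         [0 for i in range(columns)] for i in range(rows)
--     ]  # loop over columns then over rows
--     return null_matrix
--
-- def upper_triangular(matrix: list[list]) -> list[list]:
--     rows = len(matrix)
--     columns = len(matrix[0])
--     upper_matrix = null(rows, columns)  # null matrix
--     for i in range(rows):
--         for j in range(columns):
--             if i >= j:
--                 upper_matrix[i][j] += matrix[i][j]
--             else:
--                 continue
--     return upper_matrix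
-- ===== SOURCE B (Python) =====
-- def upper_triangular(matrix: list[list]) -> list[list]:
--     columns = len(matrix[0])
--     return [list(row[:i + 1]) + [0] * (columns - i - 1) for i, row in enumerate(matrix)]
-- ===== Notes on version B (the rewrite author's own statement) =====
-- stated objective: simpler
-- what changed: B builds each output row directly as the kept prefix row[:i+1] plus zero padding in one comprehension, instead of allocating a separate null matrix and copying entries one by one under a per-cell i>=j test.
-- outside the precondition, e.g. on upper_triangular([[1], [2, 3]]): A returns [[1], [2]], B returns [[1], [2, 3]]; on upper_triangular([]): A raises IndexError, B raises IndexError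
import Mathlib
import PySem

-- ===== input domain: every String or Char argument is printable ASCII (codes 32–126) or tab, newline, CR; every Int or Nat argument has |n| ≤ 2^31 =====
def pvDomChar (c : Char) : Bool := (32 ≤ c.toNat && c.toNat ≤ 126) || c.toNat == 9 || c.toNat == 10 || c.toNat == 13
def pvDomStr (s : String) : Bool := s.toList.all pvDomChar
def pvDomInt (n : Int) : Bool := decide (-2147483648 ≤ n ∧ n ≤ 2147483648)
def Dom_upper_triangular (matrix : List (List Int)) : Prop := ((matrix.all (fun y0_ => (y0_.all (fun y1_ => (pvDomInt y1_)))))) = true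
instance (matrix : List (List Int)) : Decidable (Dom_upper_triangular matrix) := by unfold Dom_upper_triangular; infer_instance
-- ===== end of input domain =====

-- B builds each output row as the kept prefix plus zero padding instead of zero-filling a null matrix and copying cells (simpler); neither version mutates its argument.

-- ===== PORT A =====
def nullMat (rows columns : Int) : List (List Int) :=
  (PySem.List.pyRange 0 rows 1).map (fun _ => (PySem.List.pyRange 0 columns 1).map (fun _ => (0 : Int)))

def upper_triangular (matrix : List (List Int)) : List (List Int) :=
  let rows : Int := matrix.length
  let columns : Int := ((PySem.List.pyGet? matrix 0).getD []).length
  let upper := nullMat rows columns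
  (PySem.List.pyRange 0 rows 1).foldl (fun um i =>
    (PySem.List.pyRange 0 columns 1).foldl (fun um j =>
      if i ≥ j then
        let r := PySem.List.pyGetD um i []
        PySem.List.pySetD um i
          (PySem.List.pySetD r j (PySem.List.pyGetD r j 0 + PySem.List.pyGetD (PySem.List.pyGetD matrix i []) j 0))
      else um) um) upper

-- ===== PORT B =====
def upper_triangular_alt (matrix : List (List Int)) : List (List Int) :=
  let columns : Int := ((PySem.List.pyGet? matrix 0).getD []).length
  matrix.mapIdx (fun i row =>
    PySem.List.slice row none (some ((i : Int) + 1)) ++ List.replicate ((columns - (i : Int) - 1)).toNat (0 : Int))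


-- ===== PRECONDITION & SPEC =====
-- Pre_ excludes the empty matrix and the ragged rows that A's fixed row-0 width mishandles: on [] and on rows too
-- short for the lower-triangular reads A raises IndexError, and on rows below the diagonal whose length differs from
-- row 0's width A's silent truncation/padding to row 0's width is an artefact of its null-matrix shape.
def Pre_upper_triangular (matrix : List (List Int)) : Prop :=
  matrix ≠ [] ∧ ∀ i < matrix.length,
    (i + 1 ≤ (matrix.headD []).length → i + 1 ≤ (matrix.getD i []).length) ∧
    ((matrix.headD []).length ≤ i + 1 → (matrix.getD i []).length = (matrix.headD []).length)
instance (matrix : List (List Int)) : Decidable (Pre_upper_triangular matrix) := by unfold Pre_upper_triangular; infer_instance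

def pvWitness_upper_triangular : List (List Int) := [[1, 2], [3, 4]]

def Spec_upper_triangular (matrix : List (List Int)) (out : List (List Int)) : Prop := out = upper_triangular_alt matrix
instance (matrix : List (List Int)) (out : List (List Int)) : Decidable (Spec_upper_triangular matrix out) := by unfold Spec_upper_triangular; infer_instance

-- ===== CLAIM (what is proved, stated in full; the proofs are below) =====
def Claim_equal_upper_triangular : Prop := ∀ (matrix : List (List Int)), Dom_upper_triangular matrix → Pre_upper_triangular matrix → Spec_upper_triangular matrix (upper_triangular matrix)

-- ===== LEMMAS AND PROOFS =====

lemma pyRange_nat (n : Nat) : PySem.List.pyRange 0 (n:Int) 1 = List.map (fun k : Nat => (k : Int)) (List.range n) := by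
  induction n with
  | zero => simp
  | succ m ih =>
    rw [show ((m+1 : Nat) : Int) = (m : Int) + 1 by push_cast; ring,
        PySem.List.pyRange_one_succ_right (by positivity), ih, List.range_succ]
    simp

lemma inner_loop (i cols : Nat) (row : List Int) (hmin : min (i + 1) cols ≤ row.length) :
    ∀ n ≤ cols,
    (List.range n).foldl
        (fun r j => if j ≤ i then r.set j (r.getD j 0 + row.getD j 0) else r)
        (List.replicate cols 0)
      = row.take (min n (i + 1)) ++ List.replicate (cols - min n (i + 1)) 0 := by
  intro n hn
  induction n with
  | zero => simp
  | succ n ih =>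
    rw [List.range_succ, List.foldl_append, ih (by omega)]
    simp only [List.foldl_cons, List.foldl_nil]
    by_cases hni : n ≤ i
    · have hmin1 : min n (i+1) = n := by omega
      have hmin' : min (n+1) (i+1) = n+1 := by omega
      have hlt : n < row.length := by omega
      have hlen : (row.take n).length = n := by simp; omega
      rw [hmin1, hmin', if_pos hni]
      have hget : (row.take n ++ List.replicate (cols - n) 0).getD n 0 = 0 := by
        rw [List.getD, List.getElem?_append_right (by omega), hlen]
        simp
      rw [hget]
      rw [List.set_append_right _ _ (by omega)]
      have : cols - n = (cols - (n+1)) + 1 := by omega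
      rw [hlen, this, Nat.sub_self, List.replicate_succ, List.set_cons_zero]
      rw [List.getD, List.getElem?_eq_getElem hlt]
      have htake : row.take (n+1) = row.take n ++ [row[n]] := by
        rw [List.take_add_one, List.getElem?_eq_getElem hlt]; rfl
      rw [htake, List.append_assoc, List.singleton_append]
      simp
    · have : min n (i+1) = i+1 := by omega
      have : min (n+1) (i+1) = i+1 := by omega
      simp [*]

lemma outer_loop (f : List (List Int) → Nat → List (List Int)) (g : Nat → List Int → List Int)
    (hf : ∀ (acc : List (List Int)) (i : Nat), i < acc.length → f acc i = acc.set i (g i (acc.getD i []))) :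
    ∀ (n : Nat) (um : List (List Int)), n ≤ um.length →
    (List.range n).foldl f um = (um.take n).mapIdx g ++ um.drop n := by
  intro n
  induction n with
  | zero => simp
  | succ n ih =>
    intro um hn
    rw [List.range_succ, List.foldl_append, ih um (by omega)]
    simp only [List.foldl_cons, List.foldl_nil]
    have hlt : n < um.length := by omega
    have hlen : ((um.take n).mapIdx g).length = n := by simp; omega
    have hacc : n < ((um.take n).mapIdx g ++ um.drop n).length := by simp; omega
    rw [hf _ n hacc]
    have hdrop : um.drop n = um[n] :: um.drop (n+1) := List.drop_eq_getElem_cons hlt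
    have hget : ((um.take n).mapIdx g ++ um.drop n).getD n [] = um[n] := by
      rw [List.getD, List.getElem?_append_right (by omega), hlen, Nat.sub_self, hdrop]
      rfl
    rw [hget, List.set_append_right _ _ (by omega), hlen, Nat.sub_self, hdrop,
        List.set_cons_zero]
    have htake : um.take (n+1) = um.take n ++ [um[n]] := by
      rw [List.take_add_one, List.getElem?_eq_getElem hlt]; rfl
    rw [htake, List.mapIdx_append, List.append_assoc]
    simp [List.length_take, Nat.min_eq_left (le_of_lt hlt)]

-- the inner loop of A touches only row i of the accumulator matrix
lemma matrix_inner (i : Nat) (row : List Int) (L : List Nat) :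
    ∀ (um : List (List Int)), i < um.length →
    L.foldl (fun um j =>
        if (i : Int) ≥ ((j : Nat) : Int) then
          um.set i ((um.getD i []).set j ((um.getD i []).getD j 0 + row.getD j 0))
        else um) um
      = um.set i (L.foldl (fun r j => if j ≤ i then r.set j (r.getD j 0 + row.getD j 0) else r) (um.getD i [])) := by
  induction L with
  | nil =>
    intro um hi
    simp [List.getD, List.getElem?_eq_getElem hi, List.set_getElem_self]
  | cons j L ih =>
    intro um hi
    simp only [List.foldl_cons]
    by_cases hji : j ≤ i
    · rw [if_pos (by exact_mod_cast hji), if_pos hji]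
      rw [ih _ (by simpa using hi), List.set_set]
      congr 1
      simp [List.getD, hi]
    · rw [if_neg (by exact_mod_cast hji), if_neg hji]
      exact ih um hi



lemma rowcalc (k cols : Nat) (row : List Int)
    (h1 : k + 1 ≤ cols → k + 1 ≤ row.length)
    (h2 : cols ≤ k + 1 → row.length = cols) :
    (List.range cols).foldl
        (fun r j => if j ≤ k then r.set j (r.getD j 0 + row.getD j 0) else r)
        (List.replicate cols 0)
      = PySem.List.slice row none (some ((k : Int) + 1)) ++
        List.replicate (((cols : Int) - (k : Int) - 1)).toNat (0 : Int) := by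
  rw [inner_loop k cols row (by omega) cols le_rfl]
  rw [show ((k : Int) + 1) = (((k + 1 : Nat)) : Int) by push_cast; ring,
      PySem.List.slice_to_natCast]
  congr 1
  · by_cases h : k + 1 ≤ cols
    · rw [Nat.min_eq_right h]
    · rw [Nat.min_eq_left (by omega), List.take_of_length_le (by omega),
          List.take_of_length_le (by omega)]
  · congr 1
    omega

theorem key (matrix : List (List Int))
    (hne : matrix ≠ [])
    (hpre : ∀ i < matrix.length,
      (i + 1 ≤ (matrix.headD []).length → i + 1 ≤ (matrix.getD i []).length) ∧
      ((matrix.headD []).length ≤ i + 1 → (matrix.getD i []).length = (matrix.headD []).length)) :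
    upper_triangular matrix = upper_triangular_alt matrix := by
  obtain ⟨r0, rest, rfl⟩ := List.exists_cons_of_ne_nil hne
  have hget0 : (PySem.List.pyGet? (r0 :: rest) 0).getD [] = r0 := by
    simp [PySem.List.pyGet?, PySem.List.pyIdx?]
  have hA0 : upper_triangular (r0 :: rest) =
      (PySem.List.pyRange 0 ((r0 :: rest).length : Int) 1).foldl (fun um i =>
        (PySem.List.pyRange 0 (((PySem.List.pyGet? (r0 :: rest) 0).getD []).length : Int) 1).foldl (fun um j =>
          if i ≥ j then
            PySem.List.pySetD um i
              (PySem.List.pySetD (PySem.List.pyGetD um i [])  j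
                (PySem.List.pyGetD (PySem.List.pyGetD um i []) j 0 +
                 PySem.List.pyGetD (PySem.List.pyGetD (r0 :: rest) i []) j 0))
          else um) um)
        ((PySem.List.pyRange 0 ((r0 :: rest).length : Int) 1).map
          (fun _ => (PySem.List.pyRange 0 (((PySem.List.pyGet? (r0 :: rest) 0).getD []).length : Int) 1).map
            (fun _ => (0 : Int)))) := rfl
  have hB0 : upper_triangular_alt (r0 :: rest) =
      (r0 :: rest).mapIdx (fun i row =>
        PySem.List.slice row none (some ((i : Int) + 1)) ++
        List.replicate (((((PySem.List.pyGet? (r0 :: rest) 0).getD []).length : Int) - (i : Int) - 1)).toNat (0 : Int)) := rfl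
  rw [hA0, hB0, hget0]
  simp only [pyRange_nat, List.foldl_map, List.map_map,
    PySem.List.pySetD_natCast, PySem.List.pyGetD_natCast]
  simp only [Function.comp_def, List.map_const', List.length_range]
  rw [outer_loop _
      (fun i r => (List.range r0.length).foldl
        (fun r j => if j ≤ i then r.set j (r.getD j 0 + ((r0 :: rest).getD i []).getD j 0) else r) r)
      (fun acc i hi => matrix_inner i ((r0 :: rest).getD i []) (List.range r0.length) acc hi)
      (r0 :: rest).length _ (by simp)]
  simp only [List.take_replicate, List.drop_replicate, Nat.min_self, Nat.sub_self,
    List.replicate_zero, List.append_nil]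
  apply List.ext_getElem
  · simp
  intro k h1 h2
  have hk : k < (r0 :: rest).length := by simpa using h2
  simp only [List.getElem_mapIdx, List.getElem_replicate]
  have hgetD : (r0 :: rest).getD k [] = (r0 :: rest)[k] := by
    rw [List.getD, List.getElem?_eq_getElem hk]; rfl
  have hcols0 : ((r0 :: rest).headD []).length = r0.length := rfl
  obtain ⟨hk1, hk2⟩ := hpre k hk
  rw [hgetD] at hk1 hk2 ⊢
  rw [hcols0] at hk1 hk2
  exact rowcalc k r0.length ((r0 :: rest)[k]) hk1 hk2

-- ===== VERDICT (by name: the statement is the Claim_ definition above) =====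
theorem upper_triangular_spec : Claim_equal_upper_triangular := by
  intro matrix _ hpre
  unfold Spec_upper_triangular
  exact key matrix hpre.1 hpre.2
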